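-- pv_equiv track=rewrite | github.com/FreddieK/algorithms-in-python | algorithms/stanford2/singlelinkclustering.py | cluster_nodes
-- ===== SOURCE A (Python) =====
-- from operator import itemgetter
--
-- def cluster_nodes(num_nodes, edges, target_num_clusters):
--     """
--     Find shortest distance and merges nodes into one
--     Iterates until number of clusters is down to k
--
--     :return:
--     """
--     edges = sorted(edges, key=itemgetter(2))
--
--     clusters = {}
--     for node in list(range(1, num_nodes + 1)):
--         clusters[node] = node
--
--     while target_num_clusters < len(set(clusters.values())):
--         _merge_clusters(clusters, edges)
--
--     cluster_lists = {}
--     for node, cluster in clusters.items():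
--         if cluster not in cluster_lists.keys():
--             cluster_lists[cluster] = [node]
--         else:
--             cluster_lists[cluster].append(node)
--
--     return [cluster_list for cluster_list in cluster_lists.values()]
--
-- def _merge_clusters(clusters, edges):
--     """
--     Broken out to be able to test this piece of logic separately
--     """
--     shortest_edge = edges[0]
--     new_cluster = clusters[shortest_edge[0]]
--     old_cluster = clusters[shortest_edge[1]]
--
--     for node, cluster in clusters.items():
--         if cluster == old_cluster:
--             clusters[node] = new_cluster
--     del edges[0]
-- ===== SOURCE B (Python) =====
-- def cluster_nodes(num_nodes, edges, target_num_clusters):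
--     """Single-link clustering down to target_num_clusters.
--
--     One pass over the weight-sorted edges with a maintained cluster count and
--     per-cluster member lists, so each merge touches only the merged cluster and
--     no per-iteration recount/full scan is needed.
--     """
--     label = {}
--     members = {}
--     for node in range(1, num_nodes + 1):
--         label[node] = node
--         members[node] = [node]
--     count = num_nodes
--
--     for u, v, _w in sorted(edges, key=lambda e: e[2]):
--         if count <= target_num_clusters:
--             break
--         new_cluster = label[u]
--         old_cluster = label[v]
--         if new_cluster != old_cluster:
--             old_members = members.pop(old_cluster)
--             for node in old_members:
--                 label[node] = new_cluster
--             members[new_cluster].extend(old_members)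
--             count -= 1
--
--     groups = {}
--     for node, cluster in label.items():
--         groups.setdefault(cluster, []).append(node)
--     return list(groups.values())
-- ===== Notes on version B (the rewrite author's own statement) =====
-- stated objective: alternative
-- what changed: Replaced A's while-loop, which on every merge rescans the whole node dict and rebuilds set(clusters.values()) to recount clusters, by a single pass over the weight-sorted edges that maintains a cluster counter and per-cluster member lists, so each merge relabels only the absorbed cluster's members and no recount or full scan happens.
import Mathlib
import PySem

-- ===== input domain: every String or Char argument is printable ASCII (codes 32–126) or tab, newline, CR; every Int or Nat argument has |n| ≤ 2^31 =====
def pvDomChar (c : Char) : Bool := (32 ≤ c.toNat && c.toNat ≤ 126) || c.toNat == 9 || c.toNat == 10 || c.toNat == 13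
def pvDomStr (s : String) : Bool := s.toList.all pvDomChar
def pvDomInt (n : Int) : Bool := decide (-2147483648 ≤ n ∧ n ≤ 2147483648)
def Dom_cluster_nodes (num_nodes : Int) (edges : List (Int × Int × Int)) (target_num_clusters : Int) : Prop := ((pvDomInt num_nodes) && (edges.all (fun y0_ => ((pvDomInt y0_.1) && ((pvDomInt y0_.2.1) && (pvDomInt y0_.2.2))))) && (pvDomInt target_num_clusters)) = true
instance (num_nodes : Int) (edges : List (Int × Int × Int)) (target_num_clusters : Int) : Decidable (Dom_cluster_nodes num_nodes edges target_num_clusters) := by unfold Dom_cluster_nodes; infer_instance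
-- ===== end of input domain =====

-- B replaces A's per-merge full-dict rescan and set-recount by one pass over the
-- weight-sorted edges with a maintained cluster counter and per-cluster member lists
-- (objective: alternative; return values proved equal on Pre_).

-- ===== PORT A =====
-- _merge_clusters(clusters, edges) on the shortest (first) edge; the dict is folded
-- entry by entry exactly as the Python `for node, cluster in clusters.items()` does.
def pvMergeClusters (clusters : PySem.Dict Int Int) (e : Int × Int × Int) : PySem.Dict Int Int :=
  let newc := clusters.getD e.1 0      -- clusters[edge[0]]; key present on Pre_ inputs
  let oldc := clusters.getD e.2.1 0    -- clusters[edge[1]]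
  clusters.items.foldl
    (fun d p => if p.2 == oldc then d.insert p.1 newc else d) clusters

-- the `while target < len(set(clusters.values()))` loop; each iteration consumes
-- edges[0] (del edges[0]), so the remaining edge list is the recursion structure.
-- In the `[]` case with the condition still true Python raises IndexError (outside Pre_).
def pvLoopA (target : Int) (clusters : PySem.Dict Int Int) :
    List (Int × Int × Int) → PySem.Dict Int Int
  | [] => clusters
  | e :: rest =>
    if target < ((PySem.Set.ofList clusters.values).length : Int) then
      pvLoopA target (pvMergeClusters clusters e) rest
    else clusters

-- the final grouping loop of A (`if cluster not in cluster_lists.keys(): … else append`)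
def pvGroupA (clusters : PySem.Dict Int Int) : List (List Int) :=
  (clusters.items.foldl
    (fun (g : PySem.Dict Int (List Int)) p =>
      if ¬ (g.keys.contains p.2) then g.insert p.2 [p.1]
      else g.modify p.2 [] (fun l => l ++ [p.1]))
    PySem.Dict.empty).values

def cluster_nodes (num_nodes : Int) (edges : List (Int × Int × Int)) (target_num_clusters : Int) : List (List Int) :=
  let sortedEdges := PySem.List.sorted edges (fun e => e.2.2) false
  let clusters := (PySem.List.pyRange 1 (num_nodes + 1) 1).foldl
    (fun (d : PySem.Dict Int Int) node => d.insert node node) PySem.Dict.empty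
  pvGroupA (pvLoopA target_num_clusters clusters sortedEdges)

-- ===== PORT B =====
-- state = (label, members, count); one step per sorted edge, `break` = stop recursing
def pvLoopB (target : Int) (st : PySem.Dict Int Int × PySem.Dict Int (List Int) × Int) :
    List (Int × Int × Int) → PySem.Dict Int Int × PySem.Dict Int (List Int) × Int
  | [] => st
  | e :: rest =>
    if st.2.2 ≤ target then st
    else
      let newC := st.1.getD e.1 0      -- label[u]; key present on Pre_ inputs
      let oldC := st.1.getD e.2.1 0    -- label[v]
      if newC ≠ oldC then
        let oldMembers := st.2.1.getD oldC []                  -- members.pop(old_cluster)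
        let label' := oldMembers.foldl (fun (d : PySem.Dict Int Int) x => d.insert x newC) st.1
        let members' := ((st.2.1.erase oldC).modify newC [] (fun l => l ++ oldMembers))
        pvLoopB target (label', members', st.2.2 - 1) rest
      else pvLoopB target st rest

-- groups.setdefault(cluster, []).append(node)
def pvGroupB (label : PySem.Dict Int Int) : List (List Int) :=
  (label.items.foldl
    (fun (g : PySem.Dict Int (List Int)) p =>
      (g.setdefault p.2 []).modify p.2 [] (fun l => l ++ [p.1]))
    PySem.Dict.empty).values

def cluster_nodes_alt (num_nodes : Int) (edges : List (Int × Int × Int)) (target_num_clusters : Int) : List (List Int) :=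
  let init := (PySem.List.pyRange 1 (num_nodes + 1) 1).foldl
    (fun (st : PySem.Dict Int Int × PySem.Dict Int (List Int)) node =>
      (st.1.insert node node, st.2.insert node [node]))
    (PySem.Dict.empty, PySem.Dict.empty)
  let fin := pvLoopB target_num_clusters (init.1, init.2, num_nodes)
    (PySem.List.sorted edges (fun e => e.2.2) false)
  pvGroupB fin.1

-- ===== PRECONDITION & SPEC =====
-- helpers for stating Pre_: the number of cluster-merging edges in a prefix of the
-- sorted edge list, computed on the prefix's endpoints only (label lookup, lazy
-- insertion of unseen endpoints, relabelling of one class per merging edge)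
def pvSeen (l : List (Int × Int)) (x : Int) : Bool := l.any (fun p => p.1 == x)

def pvLook (l : List (Int × Int)) (x : Int) : Int :=
  ((l.find? (fun p => p.1 == x)).map Prod.snd).getD x

def pvIns (l : List (Int × Int)) (x : Int) : List (Int × Int) :=
  if pvSeen l x then l else (x, x) :: l

def pvDsuMerge (l : List (Int × Int)) (r : Int) (u v : Int) : List (Int × Int) × Int :=
  if pvLook l u = pvLook l v then (l, r)
  else (l.map (fun p => (p.1, if p.2 = pvLook l v then pvLook l u else p.2)), r + 1)

def pvDsuStep (st : List (Int × Int) × Int) (e : Int × Int × Int) : List (Int × Int) × Int :=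
  pvDsuMerge (pvIns (pvIns st.1 e.1) e.2.1) st.2 e.1 e.2.1

def pvDsuRed (es : List (Int × Int × Int)) : Int := (es.foldl pvDsuStep ([], 0)).2

-- Pre_ admits exactly the inputs on which A terminates normally: some prefix of the
-- weight-sorted edge list has all its endpoints among the nodes 1..num_nodes and merging
-- that prefix leaves at most target_num_clusters clusters (cluster count = number of
-- nodes minus the prefix's merging edges).  Outside Pre_ A raises: KeyError when it
-- consumes an edge with an out-of-range endpoint, IndexError when the edges run out
-- with more than target_num_clusters clusters left.
def Pre_cluster_nodes (num_nodes : Int) (edges : List (Int × Int × Int)) (target_num_clusters : Int) : Prop :=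
  ∃ j ∈ List.range (edges.length + 1),
    (∀ e ∈ (PySem.List.sorted edges (fun e => e.2.2) false).take j,
        1 ≤ e.1 ∧ e.1 ≤ num_nodes ∧ 1 ≤ e.2.1 ∧ e.2.1 ≤ num_nodes) ∧
    max num_nodes 0 - pvDsuRed ((PySem.List.sorted edges (fun e => e.2.2) false).take j)
      ≤ target_num_clusters

instance (num_nodes : Int) (edges : List (Int × Int × Int)) (target_num_clusters : Int) : Decidable (Pre_cluster_nodes num_nodes edges target_num_clusters) := by unfold Pre_cluster_nodes; infer_instance

def pvWitness_cluster_nodes : Int × (List (Int × Int × Int)) × Int := (2, [(1, 2, 1)], 1)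

def Spec_cluster_nodes (num_nodes : Int) (edges : List (Int × Int × Int)) (target_num_clusters : Int) (out : List (List Int)) : Prop := out = cluster_nodes_alt num_nodes edges target_num_clusters
instance (num_nodes : Int) (edges : List (Int × Int × Int)) (target_num_clusters : Int) (out : List (List Int)) : Decidable (Spec_cluster_nodes num_nodes edges target_num_clusters out) := by unfold Spec_cluster_nodes; infer_instance

-- ===== CLAIM (what is proved, stated in full; the proofs are below) =====
def Claim_equal_cluster_nodes : Prop := ∀ (num_nodes : Int) (edges : List (Int × Int × Int)) (target_num_clusters : Int), Dom_cluster_nodes num_nodes edges target_num_clusters → Pre_cluster_nodes num_nodes edges target_num_clusters → Spec_cluster_nodes num_nodes edges target_num_clusters (cluster_nodes num_nodes edges target_num_clusters)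


-- ===== LEMMAS AND PROOFS =====

-- proof-side model of one A-merge: the initial labelling 1..n, a merge as a
-- relabelling of one cluster, and the number of distinct cluster labels
def pvRelabel (L : PySem.Dict Int Int) (oldc newc : Int) : PySem.Dict Int Int :=
  PySem.Dict.mk (L.items.map (fun q => (q.1, if q.2 = oldc then newc else q.2)))

def pvMergeStep (L : PySem.Dict Int Int) (e : Int × Int × Int) : PySem.Dict Int Int :=
  pvRelabel L (L.getD e.2.1 0) (L.getD e.1 0)

def pvInitLabels (n : Int) : PySem.Dict Int Int :=
  (PySem.List.pyRange 1 (n + 1) 1).foldl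
    (fun (d : PySem.Dict Int Int) node => d.insert node node) PySem.Dict.empty

def pvCount (L : PySem.Dict Int Int) : Int := ((PySem.Set.ofList L.values).length : Int)

lemma items_insert_contains (d : PySem.Dict Int Int) {k : Int} (v : Int)
    (h : d.contains k = true) :
    (d.insert k v).items = d.items.map (fun q => (q.1, if q.1 = k then v else q.2)) := by
  rw [PySem.Dict.items_insert_of_contains d v h]
  apply List.map_congr_left
  intro q _
  by_cases hq : q.1 = k
  · simp [hq]
  · simp [hq]

-- A's merge loop over a snapshot list ps of (node, value) pairs
lemma foldl_cond_insert (oldc newc : Int) :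
    ∀ (ps : List (Int × Int)) (d : PySem.Dict Int Int),
      (∀ p ∈ ps, d.contains p.1 = true) →
      (ps.foldl (fun acc p => if p.2 == oldc then acc.insert p.1 newc else acc) d).items
        = d.items.map (fun q => (q.1,
            if q.1 ∈ (ps.filter (fun p => p.2 == oldc)).map Prod.fst then newc else q.2)) := by
  intro ps
  induction ps with
  | nil => intro d _; simp
  | cons p rest ih =>
    intro d hc
    by_cases hp : p.2 = oldc
    · have hcp : d.contains p.1 = true := hc p (by simp)
      have hstep : (if (p.2 == oldc) = true then d.insert p.1 newc else d) = d.insert p.1 newc := by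
        simp [hp]
      simp only [List.foldl_cons, hstep]
      rw [ih (d.insert p.1 newc) (by
        intro q hq
        rw [PySem.Dict.contains_insert]
        simp [hc q (by simp [hq])])]
      rw [items_insert_contains d newc hcp, List.map_map]
      apply List.map_congr_left
      intro q _
      by_cases h1 : q.1 ∈ (rest.filter (fun p => p.2 == oldc)).map Prod.fst
      · simp [Function.comp, h1, hp]
      · by_cases h2 : q.1 = p.1
        · simp [Function.comp, h2, hp]
        · simp [Function.comp, h2, hp]
    · have hstep : (if (p.2 == oldc) = true then d.insert p.1 newc else d) = d := by simp [hp]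
      simp only [List.foldl_cons, hstep]
      rw [ih d (by intro q hq; exact hc q (by simp [hq]))]
      apply List.map_congr_left
      intro q _
      simp [hp]

-- B's relabel loop over the member list
lemma foldl_insert_const (newc : Int) :
    ∀ (xs : List Int) (d : PySem.Dict Int Int),
      (∀ x ∈ xs, d.contains x = true) →
      (xs.foldl (fun acc x => acc.insert x newc) d).items
        = d.items.map (fun q => (q.1, if q.1 ∈ xs then newc else q.2)) := by
  intro xs
  induction xs with
  | nil => intro d _; simp
  | cons x rest ih =>
    intro d hc
    simp only [List.foldl_cons]
    rw [ih (d.insert x newc) (by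
      intro q hq
      rw [PySem.Dict.contains_insert]
      simp [hc q (by simp [hq])])]
    rw [items_insert_contains d newc (hc x (by simp)), List.map_map]
    apply List.map_congr_left
    intro q _
    by_cases h1 : q.1 ∈ rest
    · simp [Function.comp, h1]
    · by_cases h2 : q.1 = x
      · simp [Function.comp, h2]
      · simp [Function.comp, h1, h2]

lemma get?_mkmap (f : Int → Int) :
    ∀ (l : List (Int × Int)) (x : Int),
      (PySem.Dict.mk (l.map (fun q => (q.1, f q.2)))).get? x = Option.map f ((PySem.Dict.mk l).get? x) := by
  intro l
  induction l with
  | nil => intro x; simp [PySem.Dict.get?]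
  | cons p rest ih =>
    intro x
    obtain ⟨k, v⟩ := p
    simp only [List.map_cons, PySem.Dict.get?_mk_cons]
    by_cases h : k = x
    · simp [h]
    · simp [h, ih x]

lemma get?_relabel (L : PySem.Dict Int Int) (oldc newc x : Int) :
    (pvRelabel L oldc newc).get? x = (L.get? x).map (fun c => if c = oldc then newc else c) := by
  have := get?_mkmap (fun c => if c = oldc then newc else c) L.items x
  exact this

lemma keys_relabel (L : PySem.Dict Int Int) (oldc newc : Int) :
    (pvRelabel L oldc newc).keys = L.keys := by
  simp [pvRelabel, PySem.Dict.keys, List.map_map, Function.comp]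

lemma values_relabel (L : PySem.Dict Int Int) (oldc newc : Int) :
    (pvRelabel L oldc newc).values = L.values.map (fun c => if c = oldc then newc else c) := by
  simp [pvRelabel, PySem.Dict.values, List.map_map, Function.comp]

lemma relabel_self (L : PySem.Dict Int Int) (oldc : Int) :
    pvRelabel L oldc oldc = L := by
  apply PySem.Dict.ext
  show L.items.map _ = L.items
  have : ∀ q ∈ L.items, (q.1, if q.2 = oldc then oldc else q.2) = q := by
    intro ⟨a, b⟩ _
    by_cases h : b = oldc <;> simp [h]
  rw [List.map_congr_left this, List.map_id']

-- erase facts at the members value type (PySem.Dict.erase is List.filter on items)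
lemma get?_eraseL_of_ne (d : PySem.Dict Int (List Int)) {k k' : Int} (h : k' ≠ k) :
    (d.erase k).get? k' = d.get? k' := by
  show Option.map _ (List.find? _ (d.items.filter _)) = Option.map _ (List.find? _ d.items)
  congr 1
  induction d.items with
  | nil => simp
  | cons p rest ih =>
    have hkk : (k == k') = false := by simp [Ne.symm h]
    by_cases hp : p.1 = k
    · simp [hp, ih, hkk]
    · by_cases hk' : p.1 = k'
      · simp [hk']
        exact Or.inl h
      · simp [hp, hk', ih]

lemma get?_eraseL_self (d : PySem.Dict Int (List Int)) (k : Int) :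
    (d.erase k).get? k = none := by
  show Option.map _ (List.find? _ (d.items.filter _)) = none
  rw [Option.map_eq_none_iff, List.find?_eq_none]
  intro p hp
  simp only [List.mem_filter] at hp
  simpa using hp.2

lemma getD_eraseL_of_ne (d : PySem.Dict Int (List Int)) {k k' : Int} (v : List Int) (h : k' ≠ k) :
    (d.erase k).getD k' v = d.getD k' v := by
  rw [PySem.Dict.getD_eq_get?_getD, PySem.Dict.getD_eq_get?_getD, get?_eraseL_of_ne d h]

lemma getD_eraseL_self (d : PySem.Dict Int (List Int)) (k : Int) (v : List Int) :
    (d.erase k).getD k v = v := by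
  rw [PySem.Dict.getD_eq_get?_getD, get?_eraseL_self]
  rfl

lemma get?_eq_getD_of_contains (d : PySem.Dict Int Int) {k : Int} (h : d.contains k = true) :
    d.get? k = some (d.getD k 0) := by
  rw [PySem.Dict.contains_eq_isSome_get?] at h
  obtain ⟨v, hv⟩ := Option.isSome_iff_exists.mp h
  rw [hv, PySem.Dict.getD_of_get?_eq_some d 0 hv]

lemma mem_values_of_get? (d : PySem.Dict Int Int) {k v : Int} (h : d.get? k = some v) :
    v ∈ d.values := by
  show v ∈ d.items.map (fun x => x.2)
  obtain ⟨p, hp, hpv⟩ := Option.map_eq_some_iff.mp h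
  exact List.mem_map.mpr ⟨p, List.mem_of_find?_eq_some hp, hpv⟩

-- A's merge on the shortest edge is exactly a relabel of the old cluster's fiber
lemma mergeA_eq (L : PySem.Dict Int Int) (e : Int × Int × Int) (h : L.keys.Nodup) :
    pvMergeClusters L e = pvMergeStep L e := by
  apply PySem.Dict.ext
  show (L.items.foldl _ L).items = _
  rw [foldl_cond_insert (L.getD e.2.1 0) (L.getD e.1 0) L.items L
    (fun p hp => (PySem.Dict.contains_iff_mem_keys L p.1).mpr (PySem.Dict.mem_keys_of_mem_items L hp))]
  apply List.map_congr_left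
  intro q hq
  have hgq : L.get? q.1 = some q.2 := PySem.Dict.get?_of_mem_items L hq h
  congr 1
  by_cases hv : q.2 = L.getD e.2.1 0
  · rw [if_pos hv, if_pos (List.mem_map.mpr ⟨q, List.mem_filter.mpr ⟨hq, by simp [hv]⟩, rfl⟩)]
  · rw [if_neg hv, if_neg]
    intro hmem
    obtain ⟨p, hp, hp1⟩ := List.mem_map.mp hmem
    obtain ⟨hpi, hp2⟩ := List.mem_filter.mp hp
    have : L.get? p.1 = some p.2 := PySem.Dict.get?_of_mem_items L hpi h
    rw [hp1, hgq] at this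
    exact hv (by simpa using (Option.some.inj this).symm ▸ (by simpa using hp2))

-- B's member-list relabel loop is the same relabel
lemma mergeB_eq (L : PySem.Dict Int Int) (ms : List Int) (oldc newc : Int)
    (h : L.keys.Nodup) (hms : ∀ x, x ∈ ms ↔ L.get? x = some oldc) :
    (ms.foldl (fun (d : PySem.Dict Int Int) x => d.insert x newc) L) = pvRelabel L oldc newc := by
  apply PySem.Dict.ext
  rw [foldl_insert_const newc ms L (fun x hx => by
    rw [PySem.Dict.contains_eq_isSome_get?, (hms x).mp hx]; rfl)]
  apply List.map_congr_left
  intro q hq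
  have hgq : L.get? q.1 = some q.2 := PySem.Dict.get?_of_mem_items L hq h
  congr 1
  by_cases hv : q.2 = oldc
  · rw [if_pos hv, if_pos ((hms q.1).mpr (by rw [hgq, hv]))]
  · rw [if_neg hv, if_neg (fun hmem => hv (by
      have := (hms q.1).mp hmem
      rw [hgq] at this
      exact Option.some.inj this))]

-- the members dict keeps tracking the fibers of the label dict through a merge
lemma fiber_step (L : PySem.Dict Int Int) (M : PySem.Dict Int (List Int))
    (oldc newc : Int) (hne : newc ≠ oldc)
    (hfib : ∀ k x, x ∈ M.getD k [] ↔ L.get? x = some k) :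
    ∀ k x, x ∈ ((M.erase oldc).modify newc [] (fun l => l ++ M.getD oldc [])).getD k []
      ↔ (pvRelabel L oldc newc).get? x = some k := by
  intro k x
  rw [get?_relabel]
  by_cases hk : k = newc
  · subst hk
    rw [PySem.Dict.getD_modify_self, getD_eraseL_of_ne M [] hne, List.mem_append, hfib, hfib]
    cases hL : L.get? x with
    | none => simp
    | some c =>
      by_cases hc : c = oldc
      · simp [hc]
      · simp [hc]
  · by_cases hk2 : k = oldc
    · subst hk2
      rw [PySem.Dict.getD_modify_of_ne _ [] _ (Ne.symm hne), getD_eraseL_self]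
      simp only [List.not_mem_nil, false_iff]
      cases hL : L.get? x with
      | none => simp
      | some c =>
        by_cases hc : c = k
        · simp [hc, hne]
        · simp [hc]
    · rw [PySem.Dict.getD_modify_of_ne _ [] _ hk, getD_eraseL_of_ne M [] hk2, hfib]
      cases hL : L.get? x with
      | none => simp
      | some c =>
        by_cases hc : c = oldc
        · simp [hc, (show ¬ newc = k from fun e => hk e.symm),
                (show ¬ oldc = k from fun e => hk2 e.symm)]
        · simp [hc]

-- distinct-count bookkeeping: merging two distinct present values drops the count by one
lemma ofList_length_toFinset (l : List Int) :
    (PySem.Set.ofList l).length = l.toFinset.card := by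
  rw [← List.toFinset_card_of_nodup (PySem.Set.nodup_ofList l)]
  congr 1
  apply Finset.ext
  intro y
  simp [List.mem_toFinset, PySem.Set.mem_ofList]

lemma distinct_relabel (l : List Int) {oldc newc : Int} (h : oldc ≠ newc)
    (ho : oldc ∈ l) (hn : newc ∈ l) :
    ((PySem.Set.ofList (l.map (fun c => if c = oldc then newc else c))).length : Int)
      = ((PySem.Set.ofList l).length : Int) - 1 := by
  rw [ofList_length_toFinset, ofList_length_toFinset,
    (show (l.map (fun c => if c = oldc then newc else c)).toFinset
        = l.toFinset.image (fun c => if c = oldc then newc else c) from by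
      apply Finset.ext; intro y; simp)]
  have himg : l.toFinset.image (fun c => if c = oldc then newc else c) = l.toFinset.erase oldc := by
    apply Finset.ext
    intro y
    simp only [Finset.mem_image, Finset.mem_erase, List.mem_toFinset]
    constructor
    · rintro ⟨c, hc, rfl⟩
      by_cases hco : c = oldc
      · rw [if_pos hco]
        exact ⟨Ne.symm h, hn⟩
      · rw [if_neg hco]
        exact ⟨hco, hc⟩
    · rintro ⟨hy, hyl⟩
      exact ⟨y, hyl, by rw [if_neg hy]⟩
  rw [himg, Finset.card_erase_of_mem (List.mem_toFinset.mpr ho)]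
  have h1 : 1 ≤ l.toFinset.card := Finset.card_pos.mpr ⟨oldc, List.mem_toFinset.mpr ho⟩
  rw [Nat.cast_sub h1, Nat.cast_one]

lemma contains_relabel (L : PySem.Dict Int Int) (oldc newc x : Int) :
    (pvRelabel L oldc newc).contains x = L.contains x := by
  rw [PySem.Dict.contains_eq_isSome_get?, PySem.Dict.contains_eq_isSome_get?, get?_relabel]
  cases L.get? x <;> rfl

lemma nodup_keys_relabel (L : PySem.Dict Int Int) (oldc newc : Int) (h : L.keys.Nodup) :
    (pvRelabel L oldc newc).keys.Nodup := by
  rw [keys_relabel]; exact h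

-- the two loops compute the same label dict on any input whose sorted edges admit a
-- stopping prefix (the ∃ j hypothesis: prefix endpoints present, count drops to ≤ t)
lemma loop_eq (t : Int) :
    ∀ (es : List (Int × Int × Int)) (L : PySem.Dict Int Int) (M : PySem.Dict Int (List Int)) (cnt : Int),
      L.keys.Nodup →
      (∀ k x, x ∈ M.getD k [] ↔ L.get? x = some k) →
      cnt = pvCount L →
      (∃ j ≤ es.length, (∀ e ∈ es.take j, L.contains e.1 = true ∧ L.contains e.2.1 = true) ∧
        pvCount ((es.take j).foldl pvMergeStep L) ≤ t) →
      pvLoopA t L es = (pvLoopB t (L, M, cnt) es).1 := by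
  intro es
  induction es with
  | nil => intro L M cnt _ _ _ _; rfl
  | cons e rest ih =>
    intro L M cnt hnd hfib hcnt hj
    subst hcnt
    obtain ⟨j, hjle, hir, hct⟩ := hj
    simp only [pvLoopA, pvLoopB]
    by_cases hcond : t < ((PySem.Set.ofList L.values).length : Int)
    · rw [if_pos hcond, if_neg (by unfold pvCount; omega)]
      cases j with
      | zero =>
        exfalso
        simp only [List.take_zero, List.foldl_nil] at hct
        unfold pvCount at hct
        omega
      | succ j' =>
        rw [List.take_succ_cons] at hir hct
        obtain ⟨hc1, hc2⟩ := hir e (by simp)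
        have hg1 : L.get? e.1 = some (L.getD e.1 0) := get?_eq_getD_of_contains L hc1
        have hg2 : L.get? e.2.1 = some (L.getD e.2.1 0) := get?_eq_getD_of_contains L hc2
        have hirr : ∀ e' ∈ rest.take j', L.contains e'.1 = true ∧ L.contains e'.2.1 = true :=
          fun e' he' => hir e' (List.mem_cons_of_mem _ he')
        have hct' : pvCount ((rest.take j').foldl pvMergeStep (pvMergeStep L e)) ≤ t := by
          simpa using hct
        have hjle' : j' ≤ rest.length := by simpa using hjle
        by_cases hne : L.getD e.1 0 = L.getD e.2.1 0
        · have hself : pvMergeStep L e = L := by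
            unfold pvMergeStep
            rw [← hne, relabel_self]
          rw [mergeA_eq L e hnd, hself, if_neg (by simp [hne])]
          exact ih L M _ hnd hfib rfl ⟨j', hjle', hirr, by rwa [hself] at hct'⟩
        · have hstep : pvMergeStep L e = pvRelabel L (L.getD e.2.1 0) (L.getD e.1 0) := rfl
          rw [mergeA_eq L e hnd, hstep, if_pos (by simpa using hne)]
          have hms : ∀ x, x ∈ M.getD (L.getD e.2.1 0) [] ↔ L.get? x = some (L.getD e.2.1 0) :=
            fun x => hfib _ x
          rw [show ((M.getD (L.getD e.2.1 0) []).foldl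
                (fun (d : PySem.Dict Int Int) x => d.insert x (L.getD e.1 0)) L)
              = pvRelabel L (L.getD e.2.1 0) (L.getD e.1 0) from
            mergeB_eq L _ _ _ hnd hms]
          apply ih
          · exact nodup_keys_relabel L _ _ hnd
          · exact fiber_step L M _ _ hne hfib
          · unfold pvCount
            rw [values_relabel]
            rw [distinct_relabel L.values (Ne.symm hne)
              (mem_values_of_get? L hg2) (mem_values_of_get? L hg1)]
          · refine ⟨j', hjle', ?_, by rwa [hstep] at hct'⟩
            intro e' he'
            rw [contains_relabel, contains_relabel]
            exact hirr e' he'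
    · rw [if_neg hcond, if_pos (by unfold pvCount; omega)]

lemma keys_contains (g : PySem.Dict Int (List Int)) (c : Int) :
    g.keys.contains c = g.contains c := by
  simp only [PySem.Dict.contains, PySem.Dict.keys]
  rw [Bool.eq_iff_iff]
  simp [List.any_eq_true, List.mem_map]

-- A's explicit grouping branch and B's setdefault-append produce the same dict step
lemma group_step_eq :
    (fun (g : PySem.Dict Int (List Int)) (p : Int × Int) =>
      if ¬ (g.keys.contains p.2) then g.insert p.2 [p.1]
      else g.modify p.2 [] (fun l => l ++ [p.1]))
    = (fun (g : PySem.Dict Int (List Int)) (p : Int × Int) =>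
      (g.setdefault p.2 []).modify p.2 [] (fun l => l ++ [p.1])) := by
  funext g p
  by_cases hc : g.contains p.2 = true
  · rw [PySem.Dict.setdefault_of_contains g [] hc, keys_contains, hc]
    simp
  · have hcf : g.contains p.2 = false := by simpa using hc
    rw [PySem.Dict.setdefault_of_not_contains g [] hcf, keys_contains, hcf]
    show _ = (g.insert p.2 []).insert p.2 (((g.insert p.2 []).getD p.2 []) ++ [p.1])
    rw [PySem.Dict.getD_insert_self, PySem.Dict.insert_insert_self]
    simp

lemma group_eq (d : PySem.Dict Int Int) : pvGroupA d = pvGroupB d := by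
  unfold pvGroupA pvGroupB
  rw [group_step_eq]

-- initialization facts
lemma initL_items (n : Int) :
    (pvInitLabels n).items = (PySem.List.pyRange 1 (n+1) 1).map (fun a => (a, a)) := by
  unfold pvInitLabels
  rw [PySem.Dict.items_foldl_insert_fresh _ (fun a => a) (fun a => a) _
    (fun a _ => by simp [PySem.Dict.contains_empty])
    (by simpa using PySem.List.nodup_pyRange_one 1 (n+1))]
  simp [PySem.Dict.empty]

lemma initM_items (n : Int) :
    ((PySem.List.pyRange 1 (n+1) 1).foldl
      (fun (d : PySem.Dict Int (List Int)) node => d.insert node [node]) PySem.Dict.empty).items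
    = (PySem.List.pyRange 1 (n+1) 1).map (fun a => (a, [a])) := by
  rw [PySem.Dict.items_foldl_insert_fresh _ (fun a => a) (fun a => [a]) _
    (fun a _ => by simp [PySem.Dict.contains_empty])
    (by simpa using PySem.List.nodup_pyRange_one 1 (n+1))]
  simp [PySem.Dict.empty]

lemma initL_keys (n : Int) :
    (pvInitLabels n).keys = PySem.List.pyRange 1 (n+1) 1 := by
  show _root_.List.map _ _ = _
  rw [initL_items n, List.map_map]
  exact List.map_id _

lemma initL_get? (n x : Int) :
    (pvInitLabels n).get? x = if x ∈ PySem.List.pyRange 1 (n+1) 1 then some x else none := by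
  have hnd : (pvInitLabels n).keys.Nodup := by
    rw [initL_keys]; exact PySem.List.nodup_pyRange_one 1 (n+1)
  by_cases hx : x ∈ PySem.List.pyRange 1 (n+1) 1
  · rw [if_pos hx]
    exact PySem.Dict.get?_of_mem_items _ (by rw [initL_items n]; exact List.mem_map.mpr ⟨x, hx, rfl⟩) hnd
  · rw [if_neg hx]
    rw [PySem.Dict.get?_eq_none_iff_not_mem_keys, initL_keys]
    exact hx

lemma init_fiber (n : Int) : ∀ k x,
    (x ∈ ((PySem.List.pyRange 1 (n+1) 1).foldl
      (fun (d : PySem.Dict Int (List Int)) node => d.insert node [node]) PySem.Dict.empty).getD k [])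
    ↔ (pvInitLabels n).get? x = some k := by
  intro k x
  set M0 := (PySem.List.pyRange 1 (n+1) 1).foldl
      (fun (d : PySem.Dict Int (List Int)) node => d.insert node [node]) PySem.Dict.empty with hM0
  have hkeys : M0.keys = PySem.List.pyRange 1 (n+1) 1 := by
    show M0.items.map (fun p => p.1) = _
    rw [initM_items n, List.map_map]
    exact List.map_id _
  have hnd : M0.keys.Nodup := by
    rw [hkeys]; exact PySem.List.nodup_pyRange_one 1 (n+1)
  rw [initL_get? n x]
  by_cases hk : k ∈ PySem.List.pyRange 1 (n+1) 1
  · rw [PySem.Dict.getD_of_mem_items M0 (by rw [initM_items n]; exact List.mem_map.mpr ⟨k, hk, rfl⟩) hnd]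
    by_cases hx : x ∈ PySem.List.pyRange 1 (n+1) 1
    · rw [if_pos hx]
      simp
    · rw [if_neg hx]
      simp only [List.mem_singleton]
      exact ⟨fun hxe => absurd (hxe ▸ hk) hx, fun h => by simp at h⟩
  · rw [PySem.Dict.getD_of_not_contains M0 []
      (by rw [← Bool.not_eq_true, PySem.Dict.contains_iff_mem_keys, hkeys]; exact hk)]
    simp only [List.not_mem_nil, false_iff]
    by_cases hx : x ∈ PySem.List.pyRange 1 (n+1) 1
    · rw [if_pos hx]
      intro h
      exact hk ((Option.some_inj.mp h) ▸ hx)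
    · rw [if_neg hx]; simp

lemma initL_values (n : Int) :
    (pvInitLabels n).values = PySem.List.pyRange 1 (n+1) 1 := by
  show _root_.List.map _ _ = _
  rw [initL_items n, List.map_map]
  exact List.map_id _

lemma length_range_int (n : Int) (h : 1 ≤ n) :
    ((PySem.List.pyRange 1 (n+1) 1).length : Int) = n := by
  rw [PySem.List.pyRange_of_pos _ _ (by norm_num : (0:Int) < 1)]
  simp only [List.length_map, List.length_range]
  rw [if_pos (by omega)]
  omega

-- with no node, the label dict is empty and stays empty under merges, so every count is 0
lemma initL_empty (n : Int) (h : ¬ 1 ≤ n) : (pvInitLabels n).items = [] := by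
  rw [initL_items n, PySem.List.pyRange_of_pos _ _ (by norm_num : (0:Int) < 1), if_neg (by omega)]
  rfl

lemma count_of_items_nil (L : PySem.Dict Int Int) (h : L.items = []) : pvCount L = 0 := by
  unfold pvCount
  have : L.values = [] := by
    show L.items.map _ = []
    rw [h]
    rfl
  rw [this]
  rfl


-- ===== bridge: the endpoint-only merge counter of Pre_ matches the dict fold =====
def pvInv (n : Int) (l : List (Int × Int)) (L : PySem.Dict Int Int) : Prop :=
  (∀ p ∈ l, L.get? p.1 = some p.2) ∧
  (∀ p ∈ l, p.2 ∈ l.map Prod.fst) ∧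
  (∀ x : Int, 1 ≤ x → x ≤ n → x ∉ l.map Prod.fst → L.get? x = some x)

lemma seen_iff (l : List (Int × Int)) (x : Int) :
    pvSeen l x = true ↔ x ∈ l.map Prod.fst := by
  simp only [pvSeen, List.any_eq_true, List.mem_map, beq_iff_eq]

lemma pvInv_ins (n x : Int) (l : List (Int × Int)) (L : PySem.Dict Int Int)
    (hx : 1 ≤ x ∧ x ≤ n) (h : pvInv n l L) : pvInv n (pvIns l x) L := by
  obtain ⟨h1, h2, h3⟩ := h
  unfold pvIns
  by_cases hs : pvSeen l x = true
  · rw [if_pos hs]; exact ⟨h1, h2, h3⟩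
  · rw [if_neg hs]
    have hxm : x ∉ l.map Prod.fst := fun hm => hs ((seen_iff l x).mpr hm)
    refine ⟨?_, ?_, ?_⟩
    · intro p hp
      rcases List.mem_cons.mp hp with rfl | hp'
      · exact h3 x hx.1 hx.2 hxm
      · exact h1 p hp'
    · intro p hp
      rcases List.mem_cons.mp hp with rfl | hp'
      · simp
      · simp only [List.map_cons]
        exact List.mem_cons_of_mem _ (h2 p hp')
    · intro y hy1 hy2 hym
      simp only [List.map_cons, List.mem_cons] at hym
      push Not at hym
      exact h3 y hy1 hy2 hym.2

lemma mem_keys_ins (l : List (Int × Int)) (x : Int) : x ∈ (pvIns l x).map Prod.fst := by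
  unfold pvIns
  by_cases hs : pvSeen l x = true
  · rw [if_pos hs]; exact (seen_iff l x).mp hs
  · rw [if_neg hs]; simp

lemma keys_ins_sub (l : List (Int × Int)) (x y : Int) (h : y ∈ l.map Prod.fst) :
    y ∈ (pvIns l x).map Prod.fst := by
  unfold pvIns
  by_cases hs : pvSeen l x = true
  · rw [if_pos hs]; exact h
  · rw [if_neg hs]; simp only [List.map_cons]; exact List.mem_cons_of_mem _ h

lemma look_get (n : Int) (l : List (Int × Int)) (L : PySem.Dict Int Int) (x : Int)
    (h : pvInv n l L) (hx : 1 ≤ x ∧ x ≤ n) : L.get? x = some (pvLook l x) := by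
  obtain ⟨h1, _, h3⟩ := h
  unfold pvLook
  cases hf : l.find? (fun p => p.1 == x) with
  | none =>
    have hxm : x ∉ l.map Prod.fst := by
      intro hm
      obtain ⟨p, hp, hpe⟩ := List.mem_map.mp hm
      have := List.find?_eq_none.mp hf p hp
      simp [hpe] at this
    simpa using h3 x hx.1 hx.2 hxm
  | some p =>
    have hp : p ∈ l := List.mem_of_find?_eq_some hf
    have hpe : p.1 = x := by
      have := List.find?_some hf
      simpa using this
    simp only [Option.map_some, Option.getD_some]
    rw [← hpe]
    exact h1 p hp

lemma look_mem_keys (l : List (Int × Int)) (x : Int)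
    (h2 : ∀ p ∈ l, p.2 ∈ l.map Prod.fst) (hx : x ∈ l.map Prod.fst) :
    pvLook l x ∈ l.map Prod.fst := by
  unfold pvLook
  cases hf : l.find? (fun p => p.1 == x) with
  | none =>
    exfalso
    obtain ⟨p, hp, hpe⟩ := List.mem_map.mp hx
    have := List.find?_eq_none.mp hf p hp
    simp [hpe] at this
  | some p =>
    simp only [Option.map_some, Option.getD_some]
    exact h2 p (List.mem_of_find?_eq_some hf)

lemma dsu_step (n : Int) (l : List (Int × Int)) (r : Int) (L : PySem.Dict Int Int)
    (e : Int × Int × Int)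
    (he : 1 ≤ e.1 ∧ e.1 ≤ n ∧ 1 ≤ e.2.1 ∧ e.2.1 ≤ n)
    (hinv : pvInv n l L) (hc : pvCount L = n - r) :
    pvInv n (pvDsuStep (l, r) e).1 (pvMergeStep L e) ∧
      pvCount (pvMergeStep L e) = n - (pvDsuStep (l, r) e).2 := by
  have hinv1 : pvInv n (pvIns (pvIns l e.1) e.2.1) L :=
    pvInv_ins n e.2.1 _ L ⟨he.2.2.1, he.2.2.2⟩ (pvInv_ins n e.1 l L ⟨he.1, he.2.1⟩ hinv)
  set l1 := pvIns (pvIns l e.1) e.2.1 with hl1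
  have he1 : e.1 ∈ l1.map Prod.fst := keys_ins_sub _ _ _ (mem_keys_ins l e.1)
  have he2 : e.2.1 ∈ l1.map Prod.fst := mem_keys_ins _ e.2.1
  have hgu : L.get? e.1 = some (pvLook l1 e.1) := look_get n l1 L e.1 hinv1 ⟨he.1, he.2.1⟩
  have hgv : L.get? e.2.1 = some (pvLook l1 e.2.1) :=
    look_get n l1 L e.2.1 hinv1 ⟨he.2.2.1, he.2.2.2⟩
  have hdu : L.getD e.1 0 = pvLook l1 e.1 := PySem.Dict.getD_of_get?_eq_some L 0 hgu
  have hdv : L.getD e.2.1 0 = pvLook l1 e.2.1 := PySem.Dict.getD_of_get?_eq_some L 0 hgv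
  have hlu : pvLook l1 e.1 ∈ l1.map Prod.fst := look_mem_keys l1 e.1 hinv1.2.1 he1
  have hlv : pvLook l1 e.2.1 ∈ l1.map Prod.fst := look_mem_keys l1 e.2.1 hinv1.2.1 he2
  have hstep : pvMergeStep L e = pvRelabel L (pvLook l1 e.2.1) (pvLook l1 e.1) := by
    unfold pvMergeStep
    rw [hdu, hdv]
  show pvInv n (pvDsuMerge l1 r e.1 e.2.1).1 _ ∧ _ = n - (pvDsuMerge l1 r e.1 e.2.1).2
  unfold pvDsuMerge
  by_cases heq : pvLook l1 e.1 = pvLook l1 e.2.1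
  · rw [if_pos heq]
    have : pvMergeStep L e = L := by
      rw [hstep, ← heq, relabel_self]
    rw [this]
    exact ⟨hinv1, hc⟩
  · rw [if_neg heq]
    rw [hstep]
    obtain ⟨h1, h2, h3⟩ := hinv1
    constructor
    · refine ⟨?_, ?_, ?_⟩
      · intro p hp
        obtain ⟨q, hq, hqe⟩ := List.mem_map.mp hp
        rw [← hqe]
        simp only
        rw [get?_relabel, h1 q hq]
        rfl
      · intro p hp
        obtain ⟨q, hq, hqe⟩ := List.mem_map.mp hp
        have hkeys : (l1.map (fun p => (p.1, if p.2 = pvLook l1 e.2.1 then pvLook l1 e.1 else p.2))).map Prod.fst = l1.map Prod.fst := by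
          rw [List.map_map]; rfl
        rw [hkeys, ← hqe]
        simp only
        by_cases hq2 : q.2 = pvLook l1 e.2.1
        · rw [if_pos hq2]; exact hlu
        · rw [if_neg hq2]; exact h2 q hq
      · intro y hy1 hy2 hym
        have hkeys : (l1.map (fun p => (p.1, if p.2 = pvLook l1 e.2.1 then pvLook l1 e.1 else p.2))).map Prod.fst = l1.map Prod.fst := by
          rw [List.map_map]; rfl
        rw [hkeys] at hym
        rw [get?_relabel, h3 y hy1 hy2 hym]
        have hyne : ¬ (y = pvLook l1 e.2.1) := fun hy => hym (hy ▸ hlv)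
        simp [hyne]
    · unfold pvCount
      rw [values_relabel]
      rw [distinct_relabel L.values (fun h => heq h.symm)
        (mem_values_of_get? L hgv) (mem_values_of_get? L hgu)]
      unfold pvCount at hc
      omega

lemma dsu_fold (n : Int) :
    ∀ (P : List (Int × Int × Int)) (l : List (Int × Int)) (r : Int) (L : PySem.Dict Int Int),
      (∀ e ∈ P, 1 ≤ e.1 ∧ e.1 ≤ n ∧ 1 ≤ e.2.1 ∧ e.2.1 ≤ n) →
      pvInv n l L → pvCount L = n - r →
      pvCount (P.foldl pvMergeStep L) = n - (P.foldl pvDsuStep (l, r)).2 := by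
  intro P
  induction P with
  | nil => intro l r L _ _ hc; exact hc
  | cons e rest ih =>
    intro l r L hir hinv hc
    obtain ⟨hinv', hc'⟩ := dsu_step n l r L e (hir e (by simp)) hinv hc
    simp only [List.foldl_cons]
    have : pvDsuStep (l, r) e = ((pvDsuStep (l, r) e).1, (pvDsuStep (l, r) e).2) := rfl
    rw [this]
    exact ih _ _ _ (fun e' he' => hir e' (List.mem_cons_of_mem _ he')) hinv' hc'

lemma init_inv (n : Int) : pvInv n [] (pvInitLabels n) := by
  refine ⟨by simp, by simp, ?_⟩
  intro x hx1 hx2 _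
  rw [initL_get? n x, if_pos (by rw [PySem.List.mem_pyRange_one]; omega)]

-- the main bridge: on every Pre_ input the two programs agree
lemma main_eq (n : Int) (edges : List (Int × Int × Int)) (t : Int)
    (hpre : Pre_cluster_nodes n edges t) :
    cluster_nodes n edges t = cluster_nodes_alt n edges t := by
  obtain ⟨j, hjr, hir, hct⟩ := hpre
  unfold cluster_nodes cluster_nodes_alt
  show pvGroupA (pvLoopA t
      ((PySem.List.pyRange 1 (n+1) 1).foldl
        (fun (d : PySem.Dict Int Int) node => d.insert node node) PySem.Dict.empty)
      (PySem.List.sorted edges (fun e => e.2.2) false))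
    = pvGroupB (pvLoopB t
        (((PySem.List.pyRange 1 (n+1) 1).foldl
            (fun (st : PySem.Dict Int Int × PySem.Dict Int (List Int)) node =>
              (st.1.insert node node, st.2.insert node [node]))
            (PySem.Dict.empty, PySem.Dict.empty)).1,
         ((PySem.List.pyRange 1 (n+1) 1).foldl
            (fun (st : PySem.Dict Int Int × PySem.Dict Int (List Int)) node =>
              (st.1.insert node node, st.2.insert node [node]))
            (PySem.Dict.empty, PySem.Dict.empty)).2, n)
        (PySem.List.sorted edges (fun e => e.2.2) false)).1
  rw [PySem.List.foldl_prod_mk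
    (fun (d : PySem.Dict Int Int) node => d.insert node node)
    (fun (d : PySem.Dict Int (List Int)) node => d.insert node [node])]
  show pvGroupA (pvLoopA t (pvInitLabels n) (PySem.List.sorted edges (fun e => e.2.2) false))
    = pvGroupB (pvLoopB t
        (pvInitLabels n,
         (PySem.List.pyRange 1 (n+1) 1).foldl
            (fun (d : PySem.Dict Int (List Int)) node => d.insert node [node]) PySem.Dict.empty, n)
        (PySem.List.sorted edges (fun e => e.2.2) false)).1
  by_cases hn : 1 ≤ n
  · -- at least one node: run the loop invariant
    have hnd0 : (pvInitLabels n).keys.Nodup := by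
      rw [initL_keys]; exact PySem.List.nodup_pyRange_one 1 (n+1)
    rw [loop_eq t (PySem.List.sorted edges (fun e => e.2.2) false) (pvInitLabels n) _ n
      hnd0 (init_fiber n)
      (by
        unfold pvCount
        rw [initL_values n,
          PySem.Set.ofList_eq_self_of_nodup _ (PySem.List.nodup_pyRange_one 1 (n+1)),
          length_range_int n hn])
      ⟨j, by
        rw [PySem.List.length_sorted]
        simpa using hjr, by
        intro e' he'
        have hb := hir e' he'
        constructor
        · rw [PySem.Dict.contains_iff_mem_keys, initL_keys, PySem.List.mem_pyRange_one]
          omega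
        · rw [PySem.Dict.contains_iff_mem_keys, initL_keys, PySem.List.mem_pyRange_one]
          omega, by
        have hcnt0 : pvCount (pvInitLabels n) = n - 0 := by
          unfold pvCount
          rw [initL_values n,
            PySem.Set.ofList_eq_self_of_nodup _ (PySem.List.nodup_pyRange_one 1 (n+1)),
            length_range_int n hn]
          omega
        have := dsu_fold n ((PySem.List.sorted edges (fun e => e.2.2) false).take j) [] 0
          (pvInitLabels n) hir (init_inv n) hcnt0
        unfold pvDsuRed at hct
        rw [this]
        omega⟩]
    exact group_eq _
  · -- no node: both loops stop immediately (0 ≤ t comes from the Pre_ count bound)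
    have h0 : (pvInitLabels n).items = [] := initL_empty n hn
    have ht0 : 0 ≤ t := by
      cases j with
      | zero =>
        simp only [List.take_zero] at hct
        unfold pvDsuRed at hct
        simp only [List.foldl_nil] at hct
        omega
      | succ j' =>
        exfalso
        have hjlen : j' + 1 ≤ (PySem.List.sorted edges (fun e => e.2.2) false).length := by
          rw [PySem.List.length_sorted]
          simpa using hjr
        have hne : (PySem.List.sorted edges (fun e => e.2.2) false).take (j' + 1) ≠ [] := by
          intro hnil
          have := congrArg List.length hnil
          simp only [List.length_take, List.length_nil] at this
          omega
        obtain ⟨e', he'⟩ := List.exists_mem_of_ne_nil _ hne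
        have := hir e' he'
        omega
    cases hse : PySem.List.sorted edges (fun e => e.2.2) false with
    | nil => exact group_eq _
    | cons e rest =>
      simp only [pvLoopA, pvLoopB]
      rw [show ((PySem.Set.ofList (pvInitLabels n).values).length : Int) = 0 from
        count_of_items_nil _ h0, if_neg (by omega), if_pos (by omega)]
      exact group_eq _

-- ===== VERDICT (by name: the statement is the Claim_ definition above) =====
theorem cluster_nodes_spec : Claim_equal_cluster_nodes := by
  intro n edges t _ hpre
  show cluster_nodes n edges t = cluster_nodes_alt n edges t
  exact main_eq n edges t hpre
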